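-- pv_equiv track=rewrite | github.com/ParthivSen/Image-Forgery-Detection-using-DCT | utils/helper_utils.py | shift_vector_thresh
-- ===== SOURCE A (Python) =====
-- def shift_vector_thresh(shift_vec_count, matched_blocks, shift_thresh):
--     matched_pixels_start = []
--     for sf in shift_vec_count:
--         if shift_vec_count[sf] > shift_thresh:
--             for row in matched_blocks:
--                 if sf == row[4]:
--                     matched_pixels_start.append([row[2], row[3]])
--
--     return matched_pixels_start
-- ===== SOURCE B (Python) =====
-- def shift_vector_thresh(shift_vec_count, matched_blocks, shift_thresh):
--     hot = [sf for sf, cnt in shift_vec_count.items() if cnt > shift_thresh]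
--     if not hot:
--         return []
--     groups = {}
--     for row in matched_blocks:
--         groups.setdefault(row[4], []).append([row[2], row[3]])
--     out = []
--     for sf in hot:
--         out.extend(groups.get(sf, []))
--     return out
-- ===== Notes on version B (the rewrite author's own statement) =====
-- stated objective: alternative
-- what changed: Instead of rescanning all matched_blocks for every qualifying shift key, B groups matched_blocks once into a dict keyed by row[4] and then looks up each qualifying key (skipping all work when no key exceeds the threshold); the asymptotic O(S+B) vs O(S*B) gain was not measurable on the generated inputs (few distinct keys), so no speed is claimed.
import Mathlib
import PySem

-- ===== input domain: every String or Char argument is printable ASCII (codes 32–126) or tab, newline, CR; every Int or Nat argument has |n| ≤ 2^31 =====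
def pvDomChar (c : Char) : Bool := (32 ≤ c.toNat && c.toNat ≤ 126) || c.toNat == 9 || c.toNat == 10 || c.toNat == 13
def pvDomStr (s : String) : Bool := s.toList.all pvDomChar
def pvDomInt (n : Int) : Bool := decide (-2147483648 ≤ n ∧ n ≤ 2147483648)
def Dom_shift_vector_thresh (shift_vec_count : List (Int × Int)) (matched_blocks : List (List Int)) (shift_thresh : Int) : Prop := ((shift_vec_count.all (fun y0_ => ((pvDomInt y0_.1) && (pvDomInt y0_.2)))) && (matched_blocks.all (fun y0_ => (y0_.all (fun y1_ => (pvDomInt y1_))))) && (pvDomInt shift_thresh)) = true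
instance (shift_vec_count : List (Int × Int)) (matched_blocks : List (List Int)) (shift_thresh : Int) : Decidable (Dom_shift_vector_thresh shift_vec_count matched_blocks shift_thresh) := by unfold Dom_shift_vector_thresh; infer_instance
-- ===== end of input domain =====

-- B groups matched_blocks once into a dict keyed by row[4] and looks each qualifying shift key up,
-- instead of rescanning all of matched_blocks for every qualifying key (objective: alternative).

-- ===== PORT A =====
-- literal port of A: for each dict entry (sf, cnt), if cnt > thresh scan all blocks for row[4] == sf
def shift_vector_thresh (shift_vec_count : List (Int × Int)) (matched_blocks : List (List Int)) (shift_thresh : Int) : List (List Int) :=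
  shift_vec_count.foldl (fun acc sf =>
    if sf.2 > shift_thresh then
      matched_blocks.foldl (fun acc2 row =>
        if sf.1 = (PySem.List.pyGet? row 4).getD 0 then
          acc2 ++ [[(PySem.List.pyGet? row 2).getD 0, (PySem.List.pyGet? row 3).getD 0]]
        else acc2) acc
    else acc) []

-- ===== PORT B =====
-- literal port of Source B: hot keys, early [] return, one grouping pass, then lookups
def shift_vector_thresh_alt (shift_vec_count : List (Int × Int)) (matched_blocks : List (List Int)) (shift_thresh : Int) : List (List Int) :=
  let hot := (shift_vec_count.filter (fun p => p.2 > shift_thresh)).map (fun p => p.1)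
  if hot = [] then []
  else
    let groups : PySem.Dict Int (List (List Int)) :=
      matched_blocks.foldl (fun d row =>
        d.modify ((PySem.List.pyGet? row 4).getD 0) []
          (fun v => v ++ [[(PySem.List.pyGet? row 2).getD 0, (PySem.List.pyGet? row 3).getD 0]]))
        PySem.Dict.empty
    hot.foldl (fun acc sf => acc ++ groups.getD sf []) []

-- ===== PRECONDITION & SPEC =====
-- Pre_ excludes exactly the inputs on which Python A raises IndexError: some count exceeds the
-- threshold while a row of matched_blocks has fewer than 5 elements (A evaluates row[4] there).
def Pre_shift_vector_thresh (shift_vec_count : List (Int × Int)) (matched_blocks : List (List Int)) (shift_thresh : Int) : Prop :=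
  (∃ p ∈ shift_vec_count, p.2 > shift_thresh) → ∀ row ∈ matched_blocks, 5 ≤ row.length
instance (shift_vec_count : List (Int × Int)) (matched_blocks : List (List Int)) (shift_thresh : Int) : Decidable (Pre_shift_vector_thresh shift_vec_count matched_blocks shift_thresh) := by unfold Pre_shift_vector_thresh; infer_instance

def pvWitness_shift_vector_thresh : (List (Int × Int)) × List (List Int) × Int := ([(1, 5)], [[0, 0, 7, 8, 1], [0, 0, 2, 3, 4]], 2)

def Spec_shift_vector_thresh (shift_vec_count : List (Int × Int)) (matched_blocks : List (List Int)) (shift_thresh : Int) (out : List (List Int)) : Prop := out = shift_vector_thresh_alt shift_vec_count matched_blocks shift_thresh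
instance (shift_vec_count : List (Int × Int)) (matched_blocks : List (List Int)) (shift_thresh : Int) (out : List (List Int)) : Decidable (Spec_shift_vector_thresh shift_vec_count matched_blocks shift_thresh out) := by unfold Spec_shift_vector_thresh; infer_instance

-- ===== CLAIM (what is proved, stated in full; the proofs are below) =====
def Claim_equal_shift_vector_thresh : Prop := ∀ (shift_vec_count : List (Int × Int)) (matched_blocks : List (List Int)) (shift_thresh : Int), Dom_shift_vector_thresh shift_vec_count matched_blocks shift_thresh → Pre_shift_vector_thresh shift_vec_count matched_blocks shift_thresh → Spec_shift_vector_thresh shift_vec_count matched_blocks shift_thresh (shift_vector_thresh shift_vec_count matched_blocks shift_thresh)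

-- ===== LEMMAS AND PROOFS =====

-- abbreviations used only in the proofs
def pvG4 (row : List Int) : Int := (PySem.List.pyGet? row 4).getD 0
def pvVal (row : List Int) : List Int :=
  [(PySem.List.pyGet? row 2).getD 0, (PySem.List.pyGet? row 3).getD 0]

lemma pv_flatMap_filter {α β : Type} (l : List α) (q : α → Bool) (h : α → List β) :
    (l.filter q).flatMap h = l.flatMap (fun x => if q x then h x else []) := by
  induction l with
  | nil => simp
  | cons x xs ih =>
    by_cases hx : q x <;> simp [hx, ih]

-- A's value as a flatMap over the dict entries
lemma pv_A_aux (mb : List (List Int)) (t : Int) (svc : List (Int × Int)) :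
    ∀ (acc : List (List Int)),
    svc.foldl (fun acc sf =>
      if sf.2 > t then
        mb.foldl (fun acc2 row =>
          if sf.1 = (PySem.List.pyGet? row 4).getD 0 then
            acc2 ++ [[(PySem.List.pyGet? row 2).getD 0, (PySem.List.pyGet? row 3).getD 0]]
          else acc2) acc
      else acc) acc
      = acc ++ svc.flatMap (fun sf => if sf.2 > t then
          (mb.filter (fun row => pvG4 row == sf.1)).map pvVal else []) := by
  induction svc with
  | nil => intro acc; simp
  | cons sf rest ih =>
    intro acc
    have hstep : (if sf.2 > t then
        mb.foldl (fun acc2 row =>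
          if sf.1 = (PySem.List.pyGet? row 4).getD 0 then
            acc2 ++ [[(PySem.List.pyGet? row 2).getD 0, (PySem.List.pyGet? row 3).getD 0]]
          else acc2) acc
      else acc)
      = acc ++ (if sf.2 > t then (mb.filter (fun row => pvG4 row == sf.1)).map pvVal else []) := by
      by_cases h : sf.2 > t
      · simp only [h, if_true]
        rw [PySem.List.foldl_append_ite (fun row => sf.1 = (PySem.List.pyGet? row 4).getD 0)]
        congr 1
        apply congrArg
        apply List.filter_congr
        intro row _
        simp only [pvG4]
        rw [Bool.eq_iff_iff]
        simp only [beq_iff_eq, decide_eq_true_eq]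
        exact eq_comm
      · simp [h]
    simp only [List.foldl_cons, hstep, List.flatMap_cons]
    rw [ih]
    simp [List.append_assoc]

lemma pv_A_eq (svc : List (Int × Int)) (mb : List (List Int)) (t : Int) :
    shift_vector_thresh svc mb t
      = svc.flatMap (fun sf => if sf.2 > t then
          (mb.filter (fun row => pvG4 row == sf.1)).map pvVal else []) := by
  unfold shift_vector_thresh
  simpa using pv_A_aux mb t svc []

-- the grouping dict looked up at k is exactly A's inner scan for k
lemma pv_groups_getD (mb : List (List Int)) (k : Int) :
    (mb.foldl (fun d row =>
        d.modify ((PySem.List.pyGet? row 4).getD 0) []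
          (fun v => v ++ [[(PySem.List.pyGet? row 2).getD 0, (PySem.List.pyGet? row 3).getD 0]]))
        (PySem.Dict.empty : PySem.Dict Int (List (List Int)))).getD k []
      = (mb.filter (fun row => pvG4 row == k)).map pvVal := by
  have hmap : mb.foldl (fun d row =>
        d.modify ((PySem.List.pyGet? row 4).getD 0) []
          (fun v => v ++ [[(PySem.List.pyGet? row 2).getD 0, (PySem.List.pyGet? row 3).getD 0]]))
        (PySem.Dict.empty : PySem.Dict Int (List (List Int)))
      = (mb.map (fun row => (pvG4 row, pvVal row))).foldl
          (fun d p => d.modify p.1 [] (fun v => v ++ [p.2])) PySem.Dict.empty := by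
    rw [List.foldl_map]
    simp only [pvG4, pvVal]
  rw [hmap, PySem.Dict.getD_foldl_modify_append]
  rw [List.filter_map, List.map_map]
  simp [Function.comp_def, PySem.Dict.getD_empty]

lemma pv_B_eq (svc : List (Int × Int)) (mb : List (List Int)) (t : Int) :
    shift_vector_thresh_alt svc mb t
      = svc.flatMap (fun sf => if sf.2 > t then
          (mb.filter (fun row => pvG4 row == sf.1)).map pvVal else []) := by
  unfold shift_vector_thresh_alt
  by_cases hh : (svc.filter (fun p => p.2 > t)).map (fun p => p.1) = ([] : List Int)
  · simp only [hh, if_true]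
    have hf : svc.filter (fun p => decide (p.2 > t)) = [] := by
      simpa using hh
    symm
    apply List.flatMap_eq_nil_iff.mpr
    intro sf hm
    have : ¬ (sf.2 > t) := by
      have := List.filter_eq_nil_iff.mp hf sf hm
      simpa using this
    simp [this]
  · simp only [hh, if_false]
    rw [PySem.List.foldl_append_eq_flatMap]
    simp only [List.nil_append, List.flatMap_map]
    rw [pv_flatMap_filter]
    have : ∀ sf : Int × Int,
        (if decide (sf.2 > t) = true then
          (mb.foldl (fun d row =>
            d.modify ((PySem.List.pyGet? row 4).getD 0) []
              (fun v => v ++ [[(PySem.List.pyGet? row 2).getD 0, (PySem.List.pyGet? row 3).getD 0]]))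
            (PySem.Dict.empty : PySem.Dict Int (List (List Int)))).getD sf.1 []
        else [])
        = (if sf.2 > t then (mb.filter (fun row => pvG4 row == sf.1)).map pvVal else []) := by
      intro sf
      rw [pv_groups_getD]
      simp
    simp only [this]

-- ===== VERDICT (by name: the statement is the Claim_ definition above) =====
theorem shift_vector_thresh_spec : Claim_equal_shift_vector_thresh := by
  intro svc mb t _ _
  unfold Spec_shift_vector_thresh
  rw [pv_A_eq, pv_B_eq]
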